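-- pv_equiv track=rewrite | github.com/Kereminoo/Xerate | scripts/map_processor.py | merge_bookmarks
-- ===== SOURCE A (Python) =====
-- def merge_bookmarks(sections, break_length, first_and_last_objects):
--     """
--     Concatenate Bookmarks from different maps to a single string with breaks
--
--     Parameters:
--     sections (list[*list]): The bookmarks from each map in a single list
--     break_length (int): The break length
--     first_and_last_objects (list[tuple]): The first and last HitObjects of each map to synchronize other sections and audio
--
--     Returns:
--     str: The concatenated Bookmarks section
--
--     Usage:
--     merged_bookmarks = merge_bookmarks(sections,break_length,first_and_last_objects)
--     """
--     new_bookmarks = []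
--     current_offset = 0
--
--     for idx, bookmarks in enumerate(sections):
--         current_offset -= first_and_last_objects[idx][0]
--
--         if bookmarks:
--             split_bookmarks = bookmarks.split(',')
--             for bookmark in split_bookmarks:
--                 new_bookmarks.append(str(int(bookmark) + current_offset))
--
--         current_offset += first_and_last_objects[idx][1] + break_length
--     return ','.join(new_bookmarks)
-- ===== SOURCE B (Python) =====
-- def merge_bookmarks(sections, break_length, first_and_last_objects):
--     # Back-to-front: build the merged values for the suffix with base offset 0,
--     # then for each earlier section shift the whole suffix and prepend its own
--     # bookmarks (as integers); stringify once at the end.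
--     vals = []
--     for sec, (first, last) in zip(reversed(sections),
--                                   reversed(first_and_last_objects[:len(sections)])):
--         shift = last - first + break_length
--         vals = [v + shift for v in vals]
--         if sec:
--             vals = [int(b) - first for b in sec.split(',')] + vals
--     return ','.join(str(v) for v in vals)
-- ===== Notes on version B (the rewrite author's own statement) =====
-- stated objective: alternative
-- what changed: B has no running offset at all: it iterates the sections in reverse, keeping the merged suffix as a list of integers with base offset 0, uniformly shifting that whole suffix by each earlier section's gap (last - first + break_length) and prepending that section's own bookmarks, stringifying only at the end; A makes one forward pass mutating a cumulative offset around each section.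
import Mathlib
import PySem

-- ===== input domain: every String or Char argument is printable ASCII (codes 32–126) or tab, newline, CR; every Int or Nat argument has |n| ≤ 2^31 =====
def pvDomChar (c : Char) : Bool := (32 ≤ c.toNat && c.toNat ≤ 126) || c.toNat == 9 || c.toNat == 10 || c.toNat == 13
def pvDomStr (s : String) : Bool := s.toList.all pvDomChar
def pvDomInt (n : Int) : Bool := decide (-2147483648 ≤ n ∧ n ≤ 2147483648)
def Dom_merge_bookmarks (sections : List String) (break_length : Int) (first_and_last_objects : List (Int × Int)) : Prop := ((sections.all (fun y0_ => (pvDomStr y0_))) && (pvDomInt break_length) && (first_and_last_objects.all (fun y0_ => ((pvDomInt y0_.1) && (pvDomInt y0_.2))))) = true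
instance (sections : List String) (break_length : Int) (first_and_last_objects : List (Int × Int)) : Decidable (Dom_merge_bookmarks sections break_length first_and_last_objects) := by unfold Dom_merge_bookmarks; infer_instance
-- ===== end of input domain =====

-- B drops A's forward pass with a mutated running offset: it folds the sections back-to-front,
-- carrying the merged suffix as integers, shifting that suffix wholesale per section (alternative).


-- ===== PORT A =====
-- one iteration of A's `for idx, bookmarks in enumerate(sections)` loop; state = (new_bookmarks, current_offset)
def mbStepA (f : List (Int × Int)) (bl : Int) (acc : List String × Int) (p : Int × String) : List String × Int :=
  let off := acc.2 - (PySem.List.pyGetD f p.1 (0, 0)).1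
  let lst :=
    if p.2 ≠ "" then
      ((PySem.Str.split? p.2 ",").getD []).foldl
        (fun l bm => l ++ [PySem.Int.toStr ((PySem.Int.ofStr? bm).getD 0 + off)]) acc.1
    else acc.1
  (lst, off + (PySem.List.pyGetD f p.1 (0, 0)).2 + bl)

def merge_bookmarks (sections : List String) (break_length : Int) (first_and_last_objects : List (Int × Int)) : String :=
  PySem.Str.join ","
    (((PySem.List.enumerate sections 0).foldl (mbStepA first_and_last_objects break_length) ([], 0)).1)

-- ===== PORT B =====
-- one iteration of Source B's reversed loop: shift the accumulated suffix, prepend this section's bookmarks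
def mbStepB (bl : Int) (vals : List Int) (q : String × (Int × Int)) : List Int :=
  let shift := q.2.2 - q.2.1 + bl
  let shifted := vals.map (fun v => v + shift)
  if q.1 ≠ "" then
    ((PySem.Str.split? q.1 ",").getD []).map (fun b => (PySem.Int.ofStr? b).getD 0 - q.2.1) ++ shifted
  else shifted

def merge_bookmarks_alt (sections : List String) (break_length : Int) (first_and_last_objects : List (Int × Int)) : String :=
  PySem.Str.join ","
    ((((sections.zip (first_and_last_objects.take sections.length)).reverse).foldl
        (mbStepB break_length) []).map PySem.Int.toStr)

-- ===== PRECONDITION & SPEC =====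
-- Pre_ excludes exactly where Python A raises: IndexError when first_and_last_objects is shorter
-- than sections, and ValueError when some comma-separated bookmark of a nonempty section is not an int.
def Pre_merge_bookmarks (sections : List String) (break_length : Int) (first_and_last_objects : List (Int × Int)) : Prop :=
  sections.length ≤ first_and_last_objects.length ∧
  ∀ sec ∈ sections, sec ≠ "" →
    ∀ bm ∈ (PySem.Str.split? sec ",").getD [], (PySem.Int.ofStr? bm).isSome
instance (sections : List String) (break_length : Int) (first_and_last_objects : List (Int × Int)) : Decidable (Pre_merge_bookmarks sections break_length first_and_last_objects) := by unfold Pre_merge_bookmarks; infer_instance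

def pvWitness_merge_bookmarks : List String × Int × (List (Int × Int)) :=
  (["1,2", "", "30"], 5, [(10, 20), (0, 0), (7, 9)])

def Spec_merge_bookmarks (sections : List String) (break_length : Int) (first_and_last_objects : List (Int × Int)) (out : String) : Prop := out = merge_bookmarks_alt sections break_length first_and_last_objects
instance (sections : List String) (break_length : Int) (first_and_last_objects : List (Int × Int)) (out : String) : Decidable (Spec_merge_bookmarks sections break_length first_and_last_objects out) := by unfold Spec_merge_bookmarks; infer_instance

-- ===== CLAIM (what is proved, stated in full; the proofs are below) =====
def Claim_equal_merge_bookmarks : Prop := ∀ (sections : List String) (break_length : Int) (first_and_last_objects : List (Int × Int)), Dom_merge_bookmarks sections break_length first_and_last_objects → Pre_merge_bookmarks sections break_length first_and_last_objects → Spec_merge_bookmarks sections break_length first_and_last_objects (merge_bookmarks sections break_length first_and_last_objects)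

-- ===== LEMMAS AND PROOFS =====

-- the string pieces A emits for one section at offset `off`
def mbPieces (sec : String) (off : Int) : List String :=
  (if sec ≠ "" then (PySem.Str.split? sec ",").getD [] else []).map
    (fun bm => PySem.Int.toStr ((PySem.Int.ofStr? bm).getD 0 + off))

-- reference recursion: the pieces A emits from accumulator `a` onwards
def mergeFrom (bl : Int) : Int → List String → List (Int × Int) → List String
  | _, [], _ => []
  | _, _ :: _, [] => []
  | a, sec :: ss, p :: ps => mbPieces sec (a - p.1) ++ mergeFrom bl (a + (p.2 - p.1 + bl)) ss ps

lemma aLoop_eq (bl : Int) (ss : List String) :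
    ∀ (fpre g : List (Int × Int)) (l : List String) (a : Int), ss.length ≤ g.length →
      ((PySem.List.enumerate ss (fpre.length : Int)).foldl (mbStepA (fpre ++ g) bl) (l, a)).1
        = l ++ mergeFrom bl a ss g := by
  induction ss with
  | nil => intro fpre g l a _; simp [mergeFrom]
  | cons sec ss ih =>
      intro fpre g l a h
      cases g with
      | nil => simp at h
      | cons p ps =>
          rw [PySem.List.enumerate_cons, List.foldl_cons]
          have hget : PySem.List.pyGetD (fpre ++ p :: ps) ((fpre.length : Nat) : Int) (0, 0) = p := by
            rw [PySem.List.pyGetD_natCast]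
            simp [List.getD]
          have hstep : mbStepA (fpre ++ p :: ps) bl (l, a) ((fpre.length : Int), sec)
              = (l ++ mbPieces sec (a - p.1), a - p.1 + p.2 + bl) := by
            simp only [mbStepA, hget, mbPieces]
            by_cases hs : sec = ""
            · simp [hs]
            · simp only [hs, if_pos, ne_eq, not_false_iff,
                PySem.List.foldl_append_singleton_eq_map]
          rw [hstep]
          have hlen : ((fpre.length : Int) + 1) = (((fpre ++ [p]).length : Nat) : Int) := by
            simp
          have hassoc : fpre ++ p :: ps = (fpre ++ [p]) ++ ps := by simp
          rw [hlen, hassoc, ih (fpre ++ [p]) ps (l ++ mbPieces sec (a - p.1)) (a - p.1 + p.2 + bl)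
                (by simpa using h)]
          have harith : a - p.1 + p.2 + bl = a + (p.2 - p.1 + bl) := by ring
          rw [harith]
          simp [mergeFrom]

-- B's reversed fold, named
def bLoop (bl : Int) (ss : List String) (g : List (Int × Int)) : List Int :=
  ((ss.zip (g.take ss.length)).reverse).foldl (mbStepB bl) []

lemma bLoop_cons (bl : Int) (sec : String) (ss : List String) (p : Int × Int) (ps : List (Int × Int)) :
    bLoop bl (sec :: ss) (p :: ps) = mbStepB bl (bLoop bl ss ps) (sec, p) := by
  simp [bLoop, List.foldl_append]

-- B's result, shifted by `a`, is A's integer stream at accumulator `a`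
lemma bLoop_shift (bl : Int) (ss : List String) :
    ∀ (g : List (Int × Int)) (a : Int), ss.length ≤ g.length →
      ((bLoop bl ss g).map (fun v => v + a)).map PySem.Int.toStr = mergeFrom bl a ss g := by
  induction ss with
  | nil => intro g a _; simp [bLoop, mergeFrom]
  | cons sec ss ih =>
      intro g a h
      cases g with
      | nil => simp at h
      | cons p ps =>
          rw [bLoop_cons]
          have htail := ih ps (a + (p.2 - p.1 + bl)) (by simpa using h)
          simp only [mbStepB, mergeFrom, mbPieces]
          by_cases hs : sec = ""
          · simp only [hs, ne_eq, not_true_eq_false, if_neg, not_false_iff,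
              List.map_nil, List.nil_append, List.map_map]
            rw [← htail]
            simp only [List.map_map]
            congr 1
            funext v
            simp only [Function.comp_apply]
            congr 1
            ring
          · simp only [hs, ne_eq, not_false_iff, if_pos, List.map_append, List.map_map]
            rw [← htail]
            simp only [List.map_map]
            congr 1
            · congr 1
              funext bm
              simp only [Function.comp_apply]
              congr 1
              ring
            · congr 1
              funext v
              simp only [Function.comp_apply]
              congr 1
              ring

-- ===== VERDICT (by name: the statement is the Claim_ definition above) =====
theorem merge_bookmarks_spec : Claim_equal_merge_bookmarks := by
  intro sections bl f _ hpre
  unfold Spec_merge_bookmarks merge_bookmarks merge_bookmarks_alt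
  have h1 := aLoop_eq bl sections [] f [] 0 hpre.1
  have h2 := bLoop_shift bl sections f 0 hpre.1
  simp only [List.length_nil, Nat.cast_zero, List.nil_append] at h1
  rw [h1, ← h2]
  simp [bLoop]
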